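-- pv_equiv track=rewrite | github.com/noolex/sonic-mgmt-framework | CLI/actioner/show_config_authentication.py | show_tacacs_source_if
-- ===== SOURCE A (Python) =====
-- def show_tacacs_source_if(render_tables):
--
--     cmd_str = ''
--     cmd_prfx = 'tacacs-server source-interface '
--     if 'sonic-system-tacacs:sonic-system-tacacs/TACPLUS' in render_tables:
--         for tac_inst in render_tables['sonic-system-tacacs:sonic-system-tacacs/TACPLUS']:
--           if 'src_intf' in tac_inst:
--             intf = tac_inst['src_intf']
--             if intf.startswith('Ethernet'):
--                intf_split = intf.split('Ethernet')
--                cmd_str = cmd_prfx + 'Ethernet ' + intf_split[1]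
--             elif intf.startswith('Vlan'):
--                intf_split = intf.split('Vlan')
--                cmd_str = cmd_prfx + 'Vlan ' + intf_split[1]
--             elif intf.startswith('PortChannel'):
--                intf_split = intf.split('PortChannel')
--                cmd_str = cmd_prfx +  'PortChannel ' + intf_split[1]
--             elif intf.startswith('Loopback'):
--                intf_split = intf.split('Loopback')
--                cmd_str = cmd_prfx +  'Loopback ' + intf_split[1]
--             elif intf.startswith('eth0'):
--                cmd_str = cmd_prfx +  'Management 0'
--             else:
--                pass
--
--     return 'CB_SUCCESS', cmd_str
-- ===== SOURCE B (Python) =====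
-- TACPLUS_KEY = 'sonic-system-tacacs:sonic-system-tacacs/TACPLUS'
-- CMD_PRFX = 'tacacs-server source-interface '
-- PREFIXES = ('Ethernet', 'Vlan', 'PortChannel', 'Loopback')
--
--
-- def _src_intf_cmd(intf):
--     """Command string for one source interface, or None if it is unrecognised."""
--     if intf is None:
--         return None
--     for prefix in PREFIXES:
--         if intf.startswith(prefix):
--             return CMD_PRFX + prefix + ' ' + intf.split(prefix)[1]
--     if intf.startswith('eth0'):
--         return CMD_PRFX + 'Management 0'
--     return None
--
--
-- def show_tacacs_source_if(render_tables):
--     # Only the most recent recognised source interface matters, so scan the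
--     # instances from the end and stop at the first one that yields a command.
--     for inst in reversed(render_tables.get(TACPLUS_KEY, [])):
--         cmd = _src_intf_cmd(inst.get('src_intf'))
--         if cmd is not None:
--             return 'CB_SUCCESS', cmd
--     return 'CB_SUCCESS', ''
-- ===== Notes on version B (the rewrite author's own statement) =====
-- stated objective: alternative
-- what changed: Instead of a forward fold that keeps overwriting cmd_str through a five-branch if/elif chain, B scans the instance list in reverse and returns at the first instance whose src_intf a small table-driven helper can format (the last match is the only one that matters), so it traverses in the opposite order with early termination and no accumulator.
import Mathlib
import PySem

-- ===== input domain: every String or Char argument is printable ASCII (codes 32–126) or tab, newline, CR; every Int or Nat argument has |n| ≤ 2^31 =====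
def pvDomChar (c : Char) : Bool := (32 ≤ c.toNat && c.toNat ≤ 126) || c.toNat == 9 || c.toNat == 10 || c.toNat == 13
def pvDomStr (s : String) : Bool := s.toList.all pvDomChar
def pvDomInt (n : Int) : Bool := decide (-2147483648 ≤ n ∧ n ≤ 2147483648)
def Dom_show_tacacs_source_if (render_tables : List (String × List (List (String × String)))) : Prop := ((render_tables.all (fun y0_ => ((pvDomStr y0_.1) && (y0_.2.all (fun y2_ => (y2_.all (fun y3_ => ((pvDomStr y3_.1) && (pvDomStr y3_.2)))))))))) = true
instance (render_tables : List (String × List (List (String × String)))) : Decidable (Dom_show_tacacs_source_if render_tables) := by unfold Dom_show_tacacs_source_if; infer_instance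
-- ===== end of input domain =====

-- B scans the instance list in reverse and returns at the first instance a table-driven helper
-- can format (only the last recognised source interface matters), instead of A's forward fold
-- that overwrites an accumulator through a five-branch if/elif chain — objective: alternative.

-- ===== PORT A =====
-- intf.split(p)[1]; both Pythons call it only under 'intf.startswith(p)' with p ≠ "", where
-- split? is 'some' and index 1 exists, so the getD defaults are never taken (exact there).
def pySplit1 (intf p : String) : String :=
  ((PySem.Str.split? intf p).getD []).getD 1 ""

def show_tacacs_source_if (render_tables : List (String × List (List (String × String)))) : String × String :=
  let cmd_prfx := "tacacs-server source-interface "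
  let cmd_str0 := ""
  let cmd_str :=
    match (PySem.Dict.mk render_tables).get? "sonic-system-tacacs:sonic-system-tacacs/TACPLUS" with
    | none => cmd_str0
    | some insts =>
        insts.foldl (fun cmd_str tac_inst =>
          match (PySem.Dict.mk tac_inst).get? "src_intf" with
          | none => cmd_str
          | some intf =>
            if PySem.Str.startswith intf "Ethernet" then
              cmd_prfx ++ "Ethernet " ++ pySplit1 intf "Ethernet"
            else if PySem.Str.startswith intf "Vlan" then
              cmd_prfx ++ "Vlan " ++ pySplit1 intf "Vlan"
            else if PySem.Str.startswith intf "PortChannel" then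
              cmd_prfx ++ "PortChannel " ++ pySplit1 intf "PortChannel"
            else if PySem.Str.startswith intf "Loopback" then
              cmd_prfx ++ "Loopback " ++ pySplit1 intf "Loopback"
            else if PySem.Str.startswith intf "eth0" then
              cmd_prfx ++ "Management 0"
            else cmd_str) cmd_str0
  ("CB_SUCCESS", cmd_str)

-- ===== PORT B =====
def pvBprefixes : List String := ["Ethernet", "Vlan", "PortChannel", "Loopback"]

-- _src_intf_cmd (the argument is inst.get('src_intf'), hence an Option)
def pvSrcIntfCmd : Option String → Option String
  | none => none
  | some intf =>
    match pvBprefixes.find? (fun p => PySem.Str.startswith intf p) with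
    | some p =>
        some ("tacacs-server source-interface " ++ p ++ " " ++ pySplit1 intf p)
    | none =>
        if PySem.Str.startswith intf "eth0" then
          some ("tacacs-server source-interface " ++ "Management 0")
        else none

-- the reversed-for loop with its early return: first formattable instance wins
def pvScan : List (List (String × String)) → Option String
  | [] => none
  | inst :: rest =>
    match pvSrcIntfCmd ((PySem.Dict.mk inst).get? "src_intf") with
    | some cmd => some cmd
    | none => pvScan rest

def show_tacacs_source_if_alt (render_tables : List (String × List (List (String × String)))) : String × String :=
  match pvScan (((PySem.Dict.mk render_tables).getD "sonic-system-tacacs:sonic-system-tacacs/TACPLUS" []).reverse) with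
  | some cmd => ("CB_SUCCESS", cmd)
  | none => ("CB_SUCCESS", "")

-- ===== PRECONDITION & SPEC =====
def Spec_show_tacacs_source_if (render_tables : List (String × List (List (String × String)))) (out : String × String) : Prop := out = show_tacacs_source_if_alt render_tables
instance (render_tables : List (String × List (List (String × String)))) (out : String × String) : Decidable (Spec_show_tacacs_source_if render_tables out) := by unfold Spec_show_tacacs_source_if; infer_instance

-- ===== CLAIM =====
def Claim_equal_show_tacacs_source_if : Prop := ∀ (render_tables : List (String × List (List (String × String)))), Dom_show_tacacs_source_if render_tables → Spec_show_tacacs_source_if render_tables (show_tacacs_source_if render_tables)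

-- ===== LEMMAS AND PROOFS =====

-- A's per-instance chain body, named for the proofs
def pvAstep (cmd_str : String) (tac_inst : List (String × String)) : String :=
  match (PySem.Dict.mk tac_inst).get? "src_intf" with
  | none => cmd_str
  | some intf =>
    if PySem.Str.startswith intf "Ethernet" then
      "tacacs-server source-interface " ++ "Ethernet " ++ pySplit1 intf "Ethernet"
    else if PySem.Str.startswith intf "Vlan" then
      "tacacs-server source-interface " ++ "Vlan " ++ pySplit1 intf "Vlan"
    else if PySem.Str.startswith intf "PortChannel" then
      "tacacs-server source-interface " ++ "PortChannel " ++ pySplit1 intf "PortChannel"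
    else if PySem.Str.startswith intf "Loopback" then
      "tacacs-server source-interface " ++ "Loopback " ++ pySplit1 intf "Loopback"
    else if PySem.Str.startswith intf "eth0" then
      "tacacs-server source-interface " ++ "Management 0"
    else cmd_str

-- A's chain body = B's helper, as an Option with default
theorem pvAstep_eq (cmd_str : String) (inst : List (String × String)) :
    pvAstep cmd_str inst
      = (pvSrcIntfCmd ((PySem.Dict.mk inst).get? "src_intf")).getD cmd_str := by
  unfold pvAstep
  cases (PySem.Dict.mk inst).get? "src_intf" with
  | none => rfl
  | some intf =>
      dsimp only
      by_cases h1 : PySem.Chars.startswith intf.toList ['E', 't', 'h', 'e', 'r', 'n', 'e', 't'] = true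
      · simp [pvSrcIntfCmd, pvBprefixes, h1]
      · by_cases h2 : PySem.Chars.startswith intf.toList ['V', 'l', 'a', 'n'] = true
        · simp [pvSrcIntfCmd, pvBprefixes, h1, h2]
        · by_cases h3 : PySem.Chars.startswith intf.toList ['P', 'o', 'r', 't', 'C', 'h', 'a', 'n', 'n', 'e', 'l'] = true
          · simp [pvSrcIntfCmd, pvBprefixes, h1, h2, h3]
          · by_cases h4 : PySem.Chars.startswith intf.toList ['L', 'o', 'o', 'p', 'b', 'a', 'c', 'k'] = true
            · simp [pvSrcIntfCmd, pvBprefixes, h1, h2, h3, h4]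
            · by_cases h5 : PySem.Chars.startswith intf.toList ['e', 't', 'h', '0'] = true
              · simp [pvSrcIntfCmd, pvBprefixes, h1, h2, h3, h4, h5]
              · simp [pvSrcIntfCmd, pvBprefixes, h1, h2, h3, h4, h5]

-- last match of the forward fold = first match of the reverse scan
theorem pvFold_eq_scan (insts : List (List (String × String))) :
    ∀ a : String, insts.foldl pvAstep a = (pvScan insts.reverse).getD a := by
  induction insts using List.reverseRecOn with
  | nil => intro a; simp [pvScan]
  | append_singleton xs x ih =>
      intro a
      rw [List.foldl_append, List.foldl_cons, List.foldl_nil, pvAstep_eq,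
        List.reverse_append]
      simp only [List.reverse_singleton, List.singleton_append, pvScan]
      cases h : pvSrcIntfCmd ((PySem.Dict.mk x).get? "src_intf") with
      | none => simp [ih a]
      | some c => simp

-- ===== VERDICT =====
theorem show_tacacs_source_if_spec : Claim_equal_show_tacacs_source_if := by
  intro render_tables _
  unfold Spec_show_tacacs_source_if show_tacacs_source_if show_tacacs_source_if_alt
  rw [PySem.Dict.getD_eq_get?_getD]
  cases (PySem.Dict.mk render_tables).get? "sonic-system-tacacs:sonic-system-tacacs/TACPLUS" with
  | none => simp [pvScan]
  | some insts =>
      simp only [Option.getD_some]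
      have h : insts.foldl pvAstep "" = (pvScan insts.reverse).getD "" :=
        pvFold_eq_scan insts ""
      rw [show (insts.foldl (fun cmd_str tac_inst =>
          match (PySem.Dict.mk tac_inst).get? "src_intf" with
          | none => cmd_str
          | some intf =>
            if PySem.Str.startswith intf "Ethernet" then
              "tacacs-server source-interface " ++ "Ethernet " ++ pySplit1 intf "Ethernet"
            else if PySem.Str.startswith intf "Vlan" then
              "tacacs-server source-interface " ++ "Vlan " ++ pySplit1 intf "Vlan"
            else if PySem.Str.startswith intf "PortChannel" then
              "tacacs-server source-interface " ++ "PortChannel " ++ pySplit1 intf "PortChannel"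
            else if PySem.Str.startswith intf "Loopback" then
              "tacacs-server source-interface " ++ "Loopback " ++ pySplit1 intf "Loopback"
            else if PySem.Str.startswith intf "eth0" then
              "tacacs-server source-interface " ++ "Management 0"
            else cmd_str) "") = insts.foldl pvAstep "" from rfl, h]
      cases pvScan insts.reverse <;> rfl
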